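-- pv_equiv track=rewrite | github.com/diegodzv/battle_subway_helper | main.py | combos_remaining
-- ===== SOURCE A (Python) =====
-- import itertools
-- from typing import Any, Dict, List, Optional, Set, Tuple
--
-- def combos_remaining(pool_ids: List[int], seen: Set[int], team_size: int = 4) -> Tuple[int, Set[int]]:
--     """
--     Dado un pool (lista de global_ids) y un conjunto 'seen',
--     calcula:
--       - num_combos compatibles (equipos posibles de tamaño team_size)
--       - possible_union: unión de ids que aparecen en al menos un combo compatible
--     """
--     pool_sorted = sorted(pool_ids)
--     if len(seen) > team_size:
--         return 0, set()
--
--     if not seen.issubset(set(pool_sorted)):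
--         return 0, set()
--
--     n = len(pool_sorted)
--     if n < team_size:
--         return 0, set()
--
--     count = 0
--     union: Set[int] = set()
--
--     for comb in itertools.combinations(pool_sorted, team_size):
--         if seen and not seen.issubset(comb):
--             continue
--         count += 1
--         union.update(comb)
--
--     return count, union
-- ===== SOURCE B (Python) =====
-- import itertools
--
--
-- def combos_remaining(pool_ids, seen, team_size=4):
--     """Enumerate only the free slots: every compatible team is the seen ids
--     plus a choice of team_size - len(seen) members from the rest of the pool,
--     so only C(n-s, k-s) teams are generated instead of filtering all C(n, k)."""
--     pool = sorted(pool_ids)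
--     if len(seen) > team_size or not seen.issubset(pool) or len(pool) < team_size:
--         return 0, set()
--     fixed = [x for x in pool if x in seen]
--     others = [x for x in pool if x not in seen]
--     count = 0
--     union = set()
--     for fill in itertools.combinations(others, team_size - len(seen)):
--         team = sorted(fixed + list(fill))
--         count += 1
--         union.update(team)
--     return count, union
-- ===== Notes on version B (the rewrite author's own statement) =====
-- stated objective: alternative
-- what changed: Instead of enumerating all C(n,k) teams and filtering each by a subset test, B enumerates only the C(n-s,k-s) choices of the free slots among the non-seen pool members and completes each with the seen ids; Pre_ excludes inputs where a seen id is duplicated in the pool while the loop is reached, where A's per-copy positional count is an accidental artefact.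
-- outside the precondition, e.g. on combos_remaining([1, 1, 2], {1}, 2): A returns (3, {1, 2}), B returns (1, {1, 2}); on combos_remaining([1, 1, 2], {1}, 3): A returns (1, {1, 2}), B returns (0, set())
import Mathlib
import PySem

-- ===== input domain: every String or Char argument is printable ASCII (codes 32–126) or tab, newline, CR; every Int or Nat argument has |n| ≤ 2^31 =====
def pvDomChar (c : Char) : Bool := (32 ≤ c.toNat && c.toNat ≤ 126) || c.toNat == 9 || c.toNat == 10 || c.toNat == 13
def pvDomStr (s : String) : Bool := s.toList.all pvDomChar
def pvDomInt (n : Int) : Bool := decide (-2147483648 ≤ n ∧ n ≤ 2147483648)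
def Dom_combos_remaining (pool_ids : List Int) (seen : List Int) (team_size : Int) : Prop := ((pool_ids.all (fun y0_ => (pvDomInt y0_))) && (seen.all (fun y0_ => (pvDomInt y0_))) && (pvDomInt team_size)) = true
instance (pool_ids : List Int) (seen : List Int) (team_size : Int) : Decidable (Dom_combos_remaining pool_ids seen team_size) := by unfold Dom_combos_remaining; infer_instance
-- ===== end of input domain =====

-- B enumerates only the free slots (combinations of the non-seen pool members) instead of
-- filtering all C(n,k) teams by a subset test (objective: alternative algorithm).

-- ===== PORT A =====
def combos_remaining (pool_ids : List Int) (seen : List Int) (team_size : Int) : Int × List Int :=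
  let pool_sorted := PySem.List.sorted pool_ids (fun x => x) false
  if (seen.length : Int) > team_size then (0, PySem.Set.empty)
  else if ¬ (PySem.Set.issubset seen (PySem.Set.ofList pool_sorted) = true) then (0, PySem.Set.empty)
  else if (pool_sorted.length : Int) < team_size then (0, PySem.Set.empty)
  else
    (PySem.List.combinations pool_sorted team_size.toNat).foldl
      (fun (st : Int × PySem.Set Int) comb =>
        if (!seen.isEmpty && !PySem.Set.issubset seen comb) = true then st
        else (st.1 + 1, PySem.Set.update st.2 comb))
      (0, PySem.Set.empty)

-- ===== PORT B =====
def combos_remaining_alt (pool_ids : List Int) (seen : List Int) (team_size : Int) : Int × List Int :=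
  let pool := PySem.List.sorted pool_ids (fun x => x) false
  if (seen.length : Int) > team_size ∨ ¬ (PySem.Set.issubset seen pool = true) ∨ (pool.length : Int) < team_size then
    (0, PySem.Set.empty)
  else
    let fixed := pool.filter (fun x => decide (x ∈ seen))
    let others := pool.filter (fun x => decide (x ∉ seen))
    (PySem.List.combinations others (team_size - (seen.length : Int)).toNat).foldl
      (fun (st : Int × PySem.Set Int) fill =>
        let team := PySem.List.sorted (fixed ++ fill) (fun x => x) false
        (st.1 + 1, PySem.Set.update st.2 team))
      (0, PySem.Set.empty)

-- ===== PRECONDITION & SPEC =====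
-- Pre_ requires seen (the encoding of a Python set) to be duplicate-free, and excludes inputs where
-- some seen id occurs more than once in the pool while the main loop is reached: there A counts a
-- team once per copy of the indistinguishable seen id, a positional artefact as defensible as
-- counting each team of ids once, and B's free-slot enumeration does not match it.
def Pre_combos_remaining (pool_ids : List Int) (seen : List Int) (team_size : Int) : Prop :=
  seen.Nodup ∧
    ¬ ((∃ v ∈ seen, 2 ≤ pool_ids.count v) ∧ (∀ v ∈ seen, v ∈ pool_ids) ∧
        (seen.length : Int) ≤ team_size ∧ team_size ≤ (pool_ids.length : Int))
instance (pool_ids : List Int) (seen : List Int) (team_size : Int) : Decidable (Pre_combos_remaining pool_ids seen team_size) := by unfold Pre_combos_remaining; infer_instance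

def pvWitness_combos_remaining : List Int × List Int × Int := ([1, 2, 3], [2], 2)

def Spec_combos_remaining (pool_ids : List Int) (seen : List Int) (team_size : Int) (out : Int × List Int) : Prop := out = combos_remaining_alt pool_ids seen team_size
instance (pool_ids : List Int) (seen : List Int) (team_size : Int) (out : Int × List Int) : Decidable (Spec_combos_remaining pool_ids seen team_size out) := by unfold Spec_combos_remaining; infer_instance

-- ===== CLAIM (what is proved, stated in full; the proofs are below) =====
def Claim_equal_combos_remaining : Prop := ∀ (pool_ids : List Int) (seen : List Int) (team_size : Int), Dom_combos_remaining pool_ids seen team_size → Pre_combos_remaining pool_ids seen team_size → Spec_combos_remaining pool_ids seen team_size (combos_remaining pool_ids seen team_size)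

-- ===== LEMMAS AND PROOFS =====

-- the compatible combinations, in A's enumeration order
def pvF (T : List Int) (k : Nat) (p : List Int) : List (List Int) :=
  (PySem.List.combinations p k).filter (fun c => decide (∀ t ∈ T, t ∈ c))

-- union of a list of combos, in first-appearance order
def pvUF (acc : PySem.Set Int) (L : List (List Int)) : PySem.Set Int :=
  L.foldl PySem.Set.update acc

lemma pvPair_fold (cond : List Int → Bool) :
    ∀ (L : List (List Int)) (a : Int) (b : PySem.Set Int),
    L.foldl (fun (st : Int × PySem.Set Int) c =>
        if cond c = true then st else (st.1 + 1, PySem.Set.update st.2 c)) (a, b)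
      = (a + (((L.filter (fun c => !cond c)).length : Nat) : Int),
         pvUF b (L.filter (fun c => !cond c))) := by
  intro L
  induction L with
  | nil => intro a b; simp [pvUF]
  | cons c L ih =>
    intro a b
    rw [List.foldl_cons, List.filter_cons]
    by_cases hc : cond c = true
    · rw [if_pos hc]
      simp only [hc, Bool.not_true, if_neg (by simp : ¬ (false = true))]
      exact ih a b
    · rw [if_neg hc]
      have hc' : (!cond c) = true := by simp [Bool.eq_false_iff.2 hc]
      rw [if_pos hc', ih]
      simp [pvUF, List.foldl_cons]
      omega

lemma pvPair_fold_map (g : List Int → List Int) :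
    ∀ (L : List (List Int)) (a : Int) (b : PySem.Set Int),
    L.foldl (fun (st : Int × PySem.Set Int) c => (st.1 + 1, PySem.Set.update st.2 (g c))) (a, b)
      = (a + ((L.length : Nat) : Int), pvUF b (L.map g)) := by
  intro L
  induction L with
  | nil => intro a b; simp [pvUF]
  | cons c L ih =>
    intro a b
    rw [List.foldl_cons, ih]
    simp [pvUF, List.foldl_cons]
    omega

lemma pvSkip (seen : List Int) (c : List Int) :
    (!(!seen.isEmpty && !PySem.Set.issubset seen c)) = decide (∀ t ∈ seen, t ∈ c) := by
  by_cases h : ∀ t ∈ seen, t ∈ c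
  · have hb : PySem.Set.issubset seen c = true := (PySem.Set.issubset_iff seen c).2 h
    simp [hb]
    exact h
  · have hb : PySem.Set.issubset seen c = false := by
      rw [Bool.eq_false_iff]
      intro hh; exact h ((PySem.Set.issubset_iff seen c).1 hh)
    have hne : seen.isEmpty = false := by
      cases seen with
      | nil => exact absurd (by intro t ht; simp at ht) h
      | cons a l => rfl
    simp [hb, h, hne]

lemma pvCompat_cons_mem {T : List Int} (x : Int) (c : List Int) (hnd : T.Nodup) (_hx : x ∈ T) :
    (∀ t ∈ T, t ∈ x :: c) ↔ (∀ t ∈ T.erase x, t ∈ c) := by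
  constructor
  · intro h t ht
    have htT : t ∈ T := List.mem_of_mem_erase ht
    have htne : t ≠ x := ((List.Nodup.mem_erase_iff hnd).1 ht).1
    rcases List.mem_cons.1 (h t htT) with h' | h'
    · exact absurd h' htne
    · exact h'
  · intro h t ht
    by_cases hte : t = x
    · simp [hte]
    · exact List.mem_cons.2 (Or.inr (h t ((List.Nodup.mem_erase_iff hnd).2 ⟨hte, ht⟩)))

lemma pvCompat_cons_not_mem {T : List Int} (x : Int) (c : List Int) (hx : x ∉ T) :
    (∀ t ∈ T, t ∈ x :: c) ↔ (∀ t ∈ T, t ∈ c) := by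
  constructor
  · intro h t ht
    rcases List.mem_cons.1 (h t ht) with h' | h'
    · exact absurd (h' ▸ ht) hx
    · exact h'
  · intro h t ht; exact List.mem_cons.2 (Or.inr (h t ht))

lemma pvF_nil_of_lt (T p : List Int) (k : Nat) (hnd : T.Nodup) (h : k < T.length) :
    pvF T k p = [] := by
  rw [pvF, List.filter_eq_nil_iff]
  intro c hc
  rcases (PySem.List.mem_combinations_iff p k c).1 hc with ⟨hsub, hlen⟩
  simp only [decide_eq_true_eq]
  intro hcompat
  have : T.length ≤ c.length := (List.Nodup.subperm hnd (fun t ht => hcompat t ht)).length_le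
  omega

lemma pvF_nil_of_not_mem (T p : List Int) (k : Nat) {x : Int} (hx : x ∈ T) (hp : x ∉ p) :
    pvF T k p = [] := by
  rw [pvF, List.filter_eq_nil_iff]
  intro c hc
  rcases (PySem.List.mem_combinations_iff p k c).1 hc with ⟨hsub, _⟩
  simp only [decide_eq_true_eq]
  intro hcompat
  exact hp (hsub.subset (hcompat x hx))

lemma pvF_cons_succ_mem {T : List Int} {x : Int} (p : List Int) (k : Nat)
    (hnd : T.Nodup) (hx : x ∈ T) :
    pvF T (k+1) (x :: p) = ((pvF (T.erase x) k p).map (x :: ·)) ++ pvF T (k+1) p := by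
  rw [pvF, PySem.List.combinations_cons_succ, List.filter_append, List.filter_map]
  have hcong : ∀ c ∈ PySem.List.combinations p k,
      ((fun c => decide (∀ t ∈ T, t ∈ c)) ∘ (fun c => x :: c)) c
        = (fun c => decide (∀ t ∈ T.erase x, t ∈ c)) c := by
    intro c _
    simp only [Function.comp_apply]
    exact decide_eq_decide.2 (pvCompat_cons_mem x c hnd hx)
  rw [List.filter_congr hcong]
  rfl

lemma pvF_cons_succ_not_mem {T : List Int} {x : Int} (p : List Int) (k : Nat)
    (hx : x ∉ T) :
    pvF T (k+1) (x :: p) = ((pvF T k p).map (x :: ·)) ++ pvF T (k+1) p := by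
  rw [pvF, PySem.List.combinations_cons_succ, List.filter_append, List.filter_map]
  have hcong : ∀ c ∈ PySem.List.combinations p k,
      ((fun c => decide (∀ t ∈ T, t ∈ c)) ∘ (fun c => x :: c)) c
        = (fun c => decide (∀ t ∈ T, t ∈ c)) c := by
    intro c _
    simp only [Function.comp_apply]
    exact decide_eq_decide.2 (pvCompat_cons_not_mem x c hx)
  rw [List.filter_congr hcong]
  rfl

-- sorted(x :: l) = x :: sorted(l) when x is a lower bound of l
lemma pvSorted_cons (x : Int) (l : List Int) (h : ∀ y ∈ l, x ≤ y) :
    PySem.List.sorted (x :: l) (fun x => x) false = x :: PySem.List.sorted l (fun x => x) false := by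
  apply PySem.List.sorted_id_eq_of_perm_of_pairwise
  · exact List.Perm.cons x (PySem.List.sorted_perm l (fun x => x) false)
  · rw [List.pairwise_cons]
    refine ⟨fun y hy => h y ((PySem.List.mem_sorted l (fun x => x) false y).1 hy), ?_⟩
    simpa using PySem.List.sorted_pairwise l (fun x => x)

-- THE CORRESPONDENCE: on a sorted pool in which every seen id occurs exactly once, A's list of
-- compatible combinations equals B's fills, each completed to a team, in the same order.
lemma pvCorr : ∀ (p T : List Int) (f : Nat),
    p.Pairwise (· ≤ ·) → T.Nodup → (∀ t ∈ T, p.count t = 1) →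
    pvF T (T.length + f) p
      = (PySem.List.combinations (p.filter (fun x => decide (x ∉ T))) f).map
          (fun c => PySem.List.sorted ((p.filter (fun x => decide (x ∈ T))) ++ c) (fun x => x) false) := by
  intro p
  induction p with
  | nil =>
    intro T f _ _ hc
    have hT : T = [] := by
      cases T with
      | nil => rfl
      | cons t ts => exact absurd (hc t (by simp)) (by simp)
    subst hT
    cases f with
    | zero => simp [pvF, PySem.List.combinations_zero, PySem.List.sorted]
    | succ f => simp [pvF, PySem.List.combinations_nil_succ]
  | cons x p ih =>
    intro T f hp hnd hc
    have hp' : p.Pairwise (· ≤ ·) := (List.pairwise_cons.1 hp).2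
    have hxle : ∀ y ∈ p, x ≤ y := (List.pairwise_cons.1 hp).1
    by_cases hx : x ∈ T
    · -- x is a seen id: it heads every compatible combo and every team
      have hxp : x ∉ p := by
        have h1 := hc x hx
        rw [List.count_cons_self] at h1
        exact List.count_eq_zero.1 (by omega)
      have hc' : ∀ t ∈ T.erase x, p.count t = 1 := by
        intro t ht
        rcases (hnd.mem_erase_iff).1 ht with ⟨htne, htT⟩
        have := hc t htT
        rwa [List.count_cons_of_ne (fun e => htne e.symm)] at this
      have hTpos : 0 < T.length := List.length_pos_of_mem hx
      have hel := List.length_erase_of_mem hx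
      have hcongT : ∀ y ∈ p, (decide (y ∈ T.erase x) = decide (y ∈ T)) := by
        intro y hy
        apply decide_eq_decide.2
        rw [hnd.mem_erase_iff]
        constructor
        · exact And.right
        · intro h; exact ⟨fun e => hxp (e ▸ hy), h⟩
      have hcongT' : ∀ y ∈ p, (decide (y ∉ T.erase x) = decide (y ∉ T)) := by
        intro y hy
        apply decide_eq_decide.2
        rw [hnd.mem_erase_iff]
        constructor
        · intro h hT'; exact h ⟨fun e => hxp (e ▸ hy), hT'⟩
        · exact fun h h2 => h h2.2
      have hkeq : T.length + f = ((T.erase x).length + f) + 1 := by omega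
      rw [hkeq, pvF_cons_succ_mem p _ hnd hx,
          pvF_nil_of_not_mem T p _ hx hxp, List.append_nil,
          ih (T.erase x) f hp' (hnd.erase x) hc']
      have hfix : (x :: p).filter (fun y => decide (y ∈ T))
          = x :: p.filter (fun y => decide (y ∈ T.erase x)) := by
        rw [List.filter_cons, if_pos (by simpa using hx), List.filter_congr hcongT]
      have hoth : (x :: p).filter (fun y => decide (y ∉ T))
          = p.filter (fun y => decide (y ∉ T.erase x)) := by
        rw [List.filter_cons, if_neg (by simpa using hx), List.filter_congr hcongT']
      rw [hfix, hoth, List.map_map]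
      apply List.map_congr_left
      intro c hcm
      rcases (PySem.List.mem_combinations_iff _ f c).1 hcm with ⟨hsub, _⟩
      simp only [Function.comp_apply, List.cons_append]
      rw [pvSorted_cons]
      intro y hy
      rcases List.mem_append.1 hy with h | h
      · exact hxle y (List.mem_of_mem_filter h)
      · exact hxle y (hsub.subset h |> List.mem_of_mem_filter)
    · -- x is not seen: it is either taken as a fill or skipped
      have hc' : ∀ t ∈ T, p.count t = 1 := by
        intro t ht
        have := hc t ht
        rwa [List.count_cons_of_ne (by rintro rfl; exact hx ht)] at this
      have hfix : (x :: p).filter (fun y => decide (y ∈ T))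
          = p.filter (fun y => decide (y ∈ T)) := by
        rw [List.filter_cons, if_neg (by simpa using hx)]
      have hoth : (x :: p).filter (fun y => decide (y ∉ T))
          = x :: p.filter (fun y => decide (y ∉ T)) := by
        rw [List.filter_cons, if_pos (by simpa using hx)]
      cases f with
      | zero =>
        -- no free slot: the only candidate team is the seen ids themselves
        rcases Nat.eq_zero_or_pos T.length with hT0 | hTpos
        · have hT : T = [] := List.length_eq_zero_iff.1 hT0
          subst hT
          simp only [List.length_nil, Nat.zero_add]
          rw [hoth]
          simp [pvF, PySem.List.combinations_zero, PySem.List.sorted_eq_nil_iff]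
        · obtain ⟨m, hm⟩ : ∃ m, T.length + 0 = m + 1 := ⟨T.length - 1, by omega⟩
          rw [hm, pvF_cons_succ_not_mem p m hx,
              pvF_nil_of_lt T p m hnd (by omega), List.map_nil, List.nil_append,
              show m + 1 = T.length + 0 from hm.symm,
              ih T 0 hp' hnd hc', hoth, hfix]
          rw [PySem.List.combinations_zero, PySem.List.combinations_zero]
      | succ f =>
        have e2 : pvF T (T.length + f + 1) p
            = (PySem.List.combinations (p.filter (fun x => decide (x ∉ T))) (f+1)).map
                (fun c => PySem.List.sorted ((p.filter (fun x => decide (x ∈ T))) ++ c) (fun x => x) false) :=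
          ih T (f+1) hp' hnd hc'
        show pvF T ((T.length + f) + 1) (x :: p) = _
        rw [pvF_cons_succ_not_mem p (T.length + f) hx,
            ih T f hp' hnd hc', e2,
            hoth, hfix, PySem.List.combinations_cons_succ, List.map_append,
            List.map_map, List.map_map]
        congr 1
        apply List.map_congr_left
        intro c hcm
        rcases (PySem.List.mem_combinations_iff _ f c).1 hcm with ⟨hsub, _⟩
        simp only [Function.comp_apply]
        have hperm : (p.filter (fun y => decide (y ∈ T)) ++ x :: c).Perm
            (x :: (p.filter (fun y => decide (y ∈ T)) ++ c)) :=
          List.perm_middle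
        rw [PySem.List.sorted_eq_sorted_of_perm _ _ _ (fun a b h => h) hperm,
            pvSorted_cons]
        intro y hy
        rcases List.mem_append.1 hy with h | h
        · exact hxle y (List.mem_of_mem_filter h)
        · exact hxle y (hsub.subset h |> List.mem_of_mem_filter)

-- ===== VERDICT (by name: the statement is the Claim_ definition above) =====
theorem combos_remaining_spec : Claim_equal_combos_remaining := by
  intro pool_ids seen ts _ hpre
  obtain ⟨hnd, hnE⟩ := hpre
  show combos_remaining pool_ids seen ts = combos_remaining_alt pool_ids seen ts
  simp only [combos_remaining, combos_remaining_alt]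
  set p := PySem.List.sorted pool_ids (fun x => x) false with hpdef
  have hperm : p.Perm pool_ids := PySem.List.sorted_perm pool_ids (fun x => x) false
  have hlen : p.length = pool_ids.length := hperm.length_eq
  have hiss : PySem.Set.issubset seen (PySem.Set.ofList p) = PySem.Set.issubset seen p := by
    by_cases h : ∀ v ∈ seen, v ∈ p
    · rw [(PySem.Set.issubset_iff seen (PySem.Set.ofList p)).2
          (fun v hv => (PySem.Set.mem_ofList p v).2 (h v hv)),
        (PySem.Set.issubset_iff seen p).2 h]
    · rw [Bool.eq_false_iff.2 (fun hh => h (fun v hv =>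
          (PySem.Set.mem_ofList p v).1 ((PySem.Set.issubset_iff seen (PySem.Set.ofList p)).1 hh v hv))),
        Bool.eq_false_iff.2 (fun hh => h ((PySem.Set.issubset_iff seen p).1 hh))]
  rw [hiss]
  by_cases h1 : (seen.length : Int) > ts
  · simp [h1]
  by_cases h2 : ∀ v ∈ seen, v ∈ p
  · have hb2 : PySem.Set.issubset seen p = true := (PySem.Set.issubset_iff seen p).2 h2
    by_cases h3 : (p.length : Int) < ts
    · simp [h1, hb2, h3]
    · rw [if_neg h1, if_neg (by rw [hb2]; simp), if_neg h3,
          if_neg (show ¬ (((seen.length : Int) > ts) ∨ ¬ (PySem.Set.issubset seen p = true) ∨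
              ((p.length : Int) < ts)) from by
            rintro (h | h | h)
            exacts [h1 h, h hb2, h3 h])]
      have hts0 : 0 ≤ ts := le_trans (Int.natCast_nonneg seen.length) (not_lt.1 h1)
      have hsk : seen.length ≤ ts.toNat := by omega
      have hkn : ts.toNat ≤ p.length := by omega
      have hf : (ts - (seen.length : Int)).toNat = ts.toNat - seen.length := by omega
      have hktot : ts.toNat = seen.length + (ts.toNat - seen.length) := by omega
      -- inside Pre_, each seen id occurs exactly once in the pool
      have hc : ∀ v ∈ seen, p.count v = 1 := by
        intro v hv
        have hmemp : v ∈ p := h2 v hv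
        have hle : p.count v ≤ 1 := by
          by_contra hgt
          exact hnE ⟨⟨v, hv, by rw [← hperm.count_eq v]; omega⟩,
            fun w hw => hperm.mem_iff.1 (h2 w hw),
            not_lt.1 h1, by rw [← hlen]; omega⟩
        have hge : 1 ≤ p.count v := List.count_pos_iff.2 hmemp
        omega
      have hp : p.Pairwise (· ≤ ·) := by
        simpa [hpdef] using PySem.List.sorted_pairwise pool_ids (fun x => x)
      -- reduce A's fold to (count, union) over the compatible combos
      rw [pvPair_fold (fun c => !seen.isEmpty && !PySem.Set.issubset seen c)
            (PySem.List.combinations p ts.toNat) 0 PySem.Set.empty,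
          List.filter_congr (fun c _ =>
            (pvSkip seen c : (!(!seen.isEmpty && !PySem.Set.issubset seen c)) = _)),
          pvPair_fold_map
            (fun c => PySem.List.sorted ((p.filter (fun x => decide (x ∈ seen))) ++ c) (fun x => x) false)]
      have hA : (PySem.List.combinations p ts.toNat).filter (fun c => decide (∀ t ∈ seen, t ∈ c))
          = pvF seen ts.toNat p := rfl
      rw [hA, hf, show ts.toNat = seen.length + (ts.toNat - seen.length) from hktot,
          pvCorr p seen (ts.toNat - seen.length) hp hnd hc]
      rw [List.length_map]
      simp
  · have hb2 : PySem.Set.issubset seen p = false :=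
      Bool.eq_false_iff.2 (fun hh => h2 ((PySem.Set.issubset_iff seen p).1 hh))
    simp [h1, hb2]
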